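-- pv_equiv track=rewrite | github.com/Josh1108/RetSys | utils/utils.py | get_clean_paragraph_indices
-- ===== SOURCE A (Python) =====
-- from typing import List, Any, Tuple
--
-- def get_clean_full_text(item: dict) -> str:
--     return item["document"]
--
-- def get_clean_paragraph_indices(item: dict) -> List[Tuple[int, int]]:
--     text = get_clean_full_text(item)
--     paragraph_indices = []
--     paragraph_start = 0
--     paragraph_end = 0
--     while paragraph_start < len(text):
--         paragraph_end = text.find("\n\n", paragraph_start)
--         if paragraph_end == -1:
--             paragraph_end = len(text)
--         paragraph_indices.append((paragraph_start, paragraph_end))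
--         paragraph_start = paragraph_end + 2
--     return paragraph_indices
-- ===== SOURCE B (Python) =====
-- from typing import List, Tuple
--
-- def get_clean_paragraph_indices(item: dict) -> List[Tuple[int, int]]:
--     # Staged passes: split the text on "\n\n" up front, drop exactly one
--     # trailing empty piece (covers '' and texts ending in "\n\n"), then
--     # rebuild the index ranges from the piece lengths with a running position.
--     text = item["document"]
--     pieces = text.split("\n\n")
--     if pieces and pieces[-1] == "":
--         pieces.pop()
--     res = []
--     pos = 0
--     for piece in pieces:
--         res.append((pos, pos + len(piece)))
--         pos += len(piece) + 2
--     return res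
-- ===== Notes on version B (the rewrite author's own statement) =====
-- stated objective: alternative
-- what changed: A walks a find-cursor over the text emitting a range per str.find("\n\n") hit; B works in staged passes: it splits the text on "\n\n" up front, trims one trailing empty piece, then reconstructs the (start,end) ranges purely from the piece lengths with a running position.
import Mathlib
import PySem

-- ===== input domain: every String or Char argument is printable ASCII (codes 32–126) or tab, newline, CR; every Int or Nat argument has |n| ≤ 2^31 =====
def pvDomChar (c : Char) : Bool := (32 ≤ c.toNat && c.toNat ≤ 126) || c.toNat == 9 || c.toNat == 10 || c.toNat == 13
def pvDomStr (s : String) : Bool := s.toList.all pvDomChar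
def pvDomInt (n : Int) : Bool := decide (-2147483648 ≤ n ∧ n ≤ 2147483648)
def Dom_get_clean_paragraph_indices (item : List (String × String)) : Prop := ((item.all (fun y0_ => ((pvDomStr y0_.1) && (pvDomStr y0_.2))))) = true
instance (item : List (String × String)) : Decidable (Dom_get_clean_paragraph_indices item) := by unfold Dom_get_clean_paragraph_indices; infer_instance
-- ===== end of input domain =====

-- B re-decomposes the task in staged passes: split the text on "\n\n" up front, trim one
-- trailing empty piece, then rebuild the ranges from the piece LENGTHS with a running
-- position — A's find-cursor over the text disappears (alternative; no speed claim).

-- ===== PORT A =====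
-- termination helper for pvLoopA: the find result (or the text length) is at least the cursor
theorem pv_start_le (cs : List Char) (start : Nat) (h : start < cs.length) :
    (start : Int) ≤ if PySem.Chars.findFrom cs ['\n','\n'] (start:Int) none = -1 then (cs.length:Int) else PySem.Chars.findFrom cs ['\n','\n'] (start:Int) none := by
  rw [PySem.Chars.findFrom_natCast cs ['\n','\n'] start (Nat.le_of_lt h)]
  have hf := PySem.Chars.neg_one_le_find (cs.drop start) ['\n','\n']
  by_cases h1 : PySem.Chars.find (cs.drop start) ['\n','\n'] = -1
  · simp [h1]; omega
  · have : ¬ ((start:Int) + PySem.Chars.find (cs.drop start) ['\n','\n'] = -1) := by omega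
    simp [h1, this]; omega

-- A's while loop: find "\n\n" from the cursor, emit (start, end), jump past the separator.
def pvLoopA (cs : List Char) (start : Nat) : List (Int × Int) :=
  if h : start < cs.length then
    let e : Int := PySem.Chars.findFrom cs ['\n', '\n'] (start : Int) none
    let e' : Int := if e = -1 then (cs.length : Int) else e
    ((start : Int), e') :: pvLoopA cs (e'.toNat + 2)
  else []
termination_by cs.length - start
decreasing_by
  have h2 : start ≤ (if PySem.Chars.findFrom cs ['\n','\n'] (start:Int) none = -1 then (cs.length:Int) else PySem.Chars.findFrom cs ['\n','\n'] (start:Int) none).toNat := by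
    simpa using Int.toNat_le_toNat (pv_start_le cs start h)
  simp only [dite_eq_ite]
  omega

def get_clean_paragraph_indices (item : List (String × String)) : List (Int × Int) :=
  match item.lookup "document" with          -- item["document"]; Pre_ excludes the KeyError (none) case
  | some text => pvLoopA text.toList 0
  | none => []

-- ===== PORT B =====
def get_clean_paragraph_indices_alt (item : List (String × String)) : List (Int × Int) :=
  match item.lookup "document" with
  | some text =>
    -- pieces = text.split("\n\n")
    let pieces := PySem.Chars.splitOn text.toList ['\n', '\n']
    -- if pieces and pieces[-1] == "": pieces.pop()
    let pieces := if pieces ≠ [] ∧ pieces.getLast? = some [] then pieces.dropLast else pieces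
    -- for piece in pieces: res.append((pos, pos+len(piece))); pos += len(piece)+2
    (pieces.foldl
      (fun (st : List (Int × Int) × Nat) piece =>
        (st.1 ++ [((st.2 : Int), ((st.2 + piece.length : Nat) : Int))], st.2 + piece.length + 2))
      ([], 0)).1
  | none => []

-- ===== PRECONDITION & SPEC =====
-- Pre_ excludes exactly the inputs with no "document" key, on which Python A raises KeyError.
def Pre_get_clean_paragraph_indices (item : List (String × String)) : Prop :=
  (item.lookup "document").isSome = true
instance (item : List (String × String)) : Decidable (Pre_get_clean_paragraph_indices item) := by
  unfold Pre_get_clean_paragraph_indices; infer_instance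

def pvWitness_get_clean_paragraph_indices : (List (String × String)) :=
  [("document", "ab\n\ncd")]

def Spec_get_clean_paragraph_indices (item : List (String × String)) (out : List (Int × Int)) : Prop := out = get_clean_paragraph_indices_alt item
instance (item : List (String × String)) (out : List (Int × Int)) : Decidable (Spec_get_clean_paragraph_indices item out) := by unfold Spec_get_clean_paragraph_indices; infer_instance

-- ===== CLAIM (what is proved, stated in full; the proofs are below) =====
def Claim_equal_get_clean_paragraph_indices : Prop := ∀ (item : List (String × String)), Dom_get_clean_paragraph_indices item → Pre_get_clean_paragraph_indices item → Spec_get_clean_paragraph_indices item (get_clean_paragraph_indices item)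

-- ===== LEMMAS AND PROOFS =====

-- first-occurrence characterizations of Chars.find on "\n\n"
theorem pv_find_eq (s : List Char) (m : Nat)
    (h1 : ['\n','\n'] <+: s.drop m) (h2 : ∀ j < m, ¬ ['\n','\n'] <+: s.drop j) :
    PySem.Chars.find s ['\n','\n'] = (m : Int) := by
  have hin : ['\n','\n'] <:+: s := h1.isInfix.trans (List.drop_suffix m s).isInfix
  have hnn : (0 : Int) ≤ PySem.Chars.find s ['\n','\n'] :=
    (PySem.Chars.find_nonneg_iff s ['\n','\n']).mpr hin
  obtain ⟨hpre, hmin⟩ := PySem.Chars.find_spec (s := s) (sub := ['\n','\n']) hnn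
  have htn : (PySem.Chars.find s ['\n','\n']).toNat = m := by
    rcases Nat.lt_trichotomy (PySem.Chars.find s ['\n','\n']).toNat m with h | h | h
    · exact absurd hpre (h2 _ h)
    · exact h
    · exact absurd h1 (hmin m h)
  omega

theorem pv_find_nil : PySem.Chars.find ([] : List Char) ['\n','\n'] = -1 := by
  apply (PySem.Chars.find_eq_neg_one_iff _ _).mpr
  intro hin
  simpa using List.eq_nil_of_infix_nil hin

theorem pv_find_head (t : List Char) :
    PySem.Chars.find ('\n' :: '\n' :: t) ['\n','\n'] = 0 := by
  have := pv_find_eq ('\n' :: '\n' :: t) 0 ⟨t, rfl⟩ (by intro j hj; exact absurd hj (Nat.not_lt_zero j))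
  simpa using this

theorem pv_find_cons (c : Char) (t : List Char) (hnp : ¬ ['\n','\n'] <+: c :: t) :
    PySem.Chars.find (c :: t) ['\n','\n'] =
      if PySem.Chars.find t ['\n','\n'] = -1 then -1
      else PySem.Chars.find t ['\n','\n'] + 1 := by
  by_cases h : PySem.Chars.find t ['\n','\n'] = -1
  · have hni : ¬ ['\n','\n'] <:+: t := (PySem.Chars.find_eq_neg_one_iff t ['\n','\n']).mp h
    have hn2 : ¬ ['\n','\n'] <:+: (c :: t) := by
      intro hin
      rcases List.infix_cons_iff.mp hin with hp | hi
      · exact hnp hp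
      · exact hni hi
    simp [h, (PySem.Chars.find_eq_neg_one_iff _ _).mpr hn2]
  · have hnn : (0 : Int) ≤ PySem.Chars.find t ['\n','\n'] := by
      have := PySem.Chars.neg_one_le_find t ['\n','\n']
      omega
    obtain ⟨hpre, hmin⟩ := PySem.Chars.find_spec (s := t) (sub := ['\n','\n']) hnn
    have heq : PySem.Chars.find (c :: t) ['\n','\n'] =
        (((PySem.Chars.find t ['\n','\n']).toNat + 1 : Nat) : Int) := by
      apply pv_find_eq
      · simpa [List.drop_succ_cons] using hpre
      · intro j hj
        cases j with
        | zero => simpa using hnp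
        | succ k =>
          rw [List.drop_succ_cons]
          exact hmin k (by omega)
    rw [heq]
    rw [if_neg h]
    omega

-- clean recursion equal to Chars.splitOn on "\n\n" (proved below from splitOn.go)
def pvSplit (l : List Char) (cur : List Char) : List (List Char) :=
  match l with
  | [] => [cur.reverse]
  | c :: rest =>
    if ['\n','\n'].isPrefixOf (c :: rest) then cur.reverse :: pvSplit ((c :: rest).drop 2) []
    else pvSplit rest (c :: cur)
termination_by l.length
decreasing_by all_goals simp

theorem pv_go_eq (fuel : Nat) : ∀ (l cur : List Char) (acc : List (List Char)),
    l.length < fuel →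
    PySem.Chars.splitOn.go ['\n','\n'] fuel l cur acc = acc.reverse ++ pvSplit l cur := by
  induction fuel with
  | zero => intro l cur acc h; omega
  | succ fuel ih =>
    intro l cur acc h
    cases l with
    | nil => simp [PySem.Chars.splitOn.go, pvSplit]
    | cons c rest =>
      by_cases hp : ['\n','\n'].isPrefixOf (c :: rest)
      · have hlen : ((c :: rest).drop 2).length < fuel := by simp at h ⊢; omega
        rw [show PySem.Chars.splitOn.go ['\n','\n'] (fuel+1) (c :: rest) cur acc
              = PySem.Chars.splitOn.go ['\n','\n'] fuel ((c :: rest).drop 2) [] (cur.reverse :: acc) from by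
          simp [PySem.Chars.splitOn.go, hp]]
        rw [ih _ _ _ hlen]
        simp [pvSplit, hp]
      · have hlen : rest.length < fuel := by simp at h; omega
        rw [show PySem.Chars.splitOn.go ['\n','\n'] (fuel+1) (c :: rest) cur acc
              = PySem.Chars.splitOn.go ['\n','\n'] fuel rest (c :: cur) acc from by
          simp [PySem.Chars.splitOn.go, hp]]
        rw [ih _ _ _ hlen]
        rw [pvSplit, if_neg hp]

theorem pv_splitOn_eq (l : List Char) :
    PySem.Chars.splitOn l ['\n','\n'] = pvSplit l [] := by
  have := pv_go_eq (l.length + 1) l [] [] (by omega)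
  simpa [PySem.Chars.splitOn] using this

theorem pv_split_ne_nil (l cur : List Char) : pvSplit l cur ≠ [] := by
  cases l with
  | nil => simp [pvSplit]
  | cons c rest =>
    rw [pvSplit]
    split
    · simp
    · exact pv_split_ne_nil rest (c :: cur)
termination_by l.length
decreasing_by simp

-- find-based characterization of pvSplit
theorem pv_split_find (l cur : List Char) :
    pvSplit l cur =
      if PySem.Chars.find l ['\n','\n'] = -1 then [cur.reverse ++ l]
      else (cur.reverse ++ l.take (PySem.Chars.find l ['\n','\n']).toNat) ::
        pvSplit (l.drop ((PySem.Chars.find l ['\n','\n']).toNat + 2)) [] := by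
  induction l, cur using pvSplit.induct with
  | case1 cur => simp [pvSplit, pv_find_nil]
  | case2 cur c rest hp ih =>
    obtain ⟨u, hu⟩ := List.isPrefixOf_iff_prefix.mp hp
    simp only [List.cons_append, List.nil_append] at hu
    injection hu with h1 hu
    subst h1; subst hu
    rw [show pvSplit ('\n' :: '\n' :: u) cur
          = cur.reverse :: pvSplit (('\n' :: '\n' :: u).drop 2) [] from by
      simp [pvSplit, hp]]
    rw [pv_find_head]
    norm_num
  | case3 cur c rest hp ih =>
    have hnp : ¬ ['\n','\n'] <+: c :: rest := fun h => hp (List.isPrefixOf_iff_prefix.mpr h)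
    rw [show pvSplit (c :: rest) cur = pvSplit rest (c :: cur) from by
      rw [pvSplit]; simp [hp]]
    rw [ih, pv_find_cons c rest hnp]
    by_cases h : PySem.Chars.find rest ['\n','\n'] = -1
    · simp [h]
    · have hnn : (0 : Int) ≤ PySem.Chars.find rest ['\n','\n'] := by
        have := PySem.Chars.neg_one_le_find rest ['\n','\n']
        omega
      have hne1 : ¬ (PySem.Chars.find rest ['\n','\n'] + 1 = -1) := by omega
      have ht1 : (PySem.Chars.find rest ['\n','\n'] + 1).toNat
          = (PySem.Chars.find rest ['\n','\n']).toNat + 1 := by omega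
      have hdrop : (c :: rest).drop ((PySem.Chars.find rest ['\n','\n']).toNat + 1 + 2)
          = rest.drop ((PySem.Chars.find rest ['\n','\n']).toNat + 2) := by
        rw [show (PySem.Chars.find rest ['\n','\n']).toNat + 1 + 2
              = ((PySem.Chars.find rest ['\n','\n']).toNat + 2) + 1 from by omega]
        exact List.drop_succ_cons ..
      simp [h, hne1, ht1, hdrop, List.take_succ_cons]

-- B's foldl as a simple recursion
def pvR (pieces : List (List Char)) (pos : Nat) : List (Int × Int) :=
  match pieces with
  | [] => []
  | p :: ps => ((pos : Int), ((pos + p.length : Nat) : Int)) :: pvR ps (pos + p.length + 2)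

theorem pv_fold_eq (pieces : List (List Char)) : ∀ (acc : List (Int × Int)) (pos : Nat),
    (pieces.foldl
      (fun (st : List (Int × Int) × Nat) piece =>
        (st.1 ++ [((st.2 : Int), ((st.2 + piece.length : Nat) : Int))], st.2 + piece.length + 2))
      (acc, pos)).1 = acc ++ pvR pieces pos := by
  induction pieces with
  | nil => intro acc pos; simp [pvR]
  | cons p ps ih =>
    intro acc pos
    simp only [List.foldl_cons, pvR]
    rw [ih]
    simp

-- the trim step distributes over a cons with nonempty tail
theorem pv_trim_cons (x : List Char) (r : List (List Char)) (hr : r ≠ []) :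
    (if x :: r ≠ [] ∧ (x :: r).getLast? = some [] then (x :: r).dropLast else x :: r)
      = x :: (if r ≠ [] ∧ r.getLast? = some [] then r.dropLast else r) := by
  obtain ⟨y, t, rfl⟩ : ∃ y t, r = y :: t := by
    cases r with
    | nil => simp at hr
    | cons y t => exact ⟨y, t, rfl⟩
  rw [List.getLast?_cons_cons, List.dropLast_cons₂]
  by_cases h : (y :: t).getLast? = some ([] : List Char) <;> simp [h]

theorem pv_main (n : Nat) : ∀ (cs : List Char) (i : Nat), cs.length - i ≤ n → i ≤ cs.length →
    pvLoopA cs i =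
      pvR (if pvSplit (cs.drop i) [] ≠ [] ∧ (pvSplit (cs.drop i) []).getLast? = some []
           then (pvSplit (cs.drop i) []).dropLast else pvSplit (cs.drop i) []) i := by
  induction n with
  | zero =>
    intro cs i hn hi
    have hIl : i = cs.length := by omega
    rw [pvLoopA]
    simp [hIl, pvSplit, pvR]
  | succ n ih =>
    intro cs i hn hi
    by_cases h : i < cs.length
    · rw [pvLoopA]
      simp only [dif_pos h]
      rw [PySem.Chars.findFrom_natCast cs ['\n','\n'] i hi]
      by_cases hf : PySem.Chars.find (cs.drop i) ['\n','\n'] = -1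
      · have hsp : pvSplit (cs.drop i) [] = [cs.drop i] := by
          rw [pv_split_find]; simp [hf]
        have hdne : cs.drop i ≠ [] := by
          intro h0
          have := congrArg List.length h0
          simp at this
          omega
        have hlen : i + (cs.drop i).length = cs.length := by simp; omega
        rw [hsp]
        simp [hf, hdne, pvR]
        refine ⟨by omega, ?_⟩
        rw [pvLoopA]
        simp
      · have hnn : (0 : Int) ≤ PySem.Chars.find (cs.drop i) ['\n','\n'] := by
          have := PySem.Chars.neg_one_le_find (cs.drop i) ['\n','\n']
          omega
        obtain ⟨hpre, _⟩ := PySem.Chars.find_spec (s := cs.drop i) (sub := ['\n','\n']) hnn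
        have hb : (PySem.Chars.find (cs.drop i) ['\n','\n']).toNat + 2 ≤ (cs.drop i).length := by
          have := hpre.length_le
          simp at this ⊢
          omega
        have hldrop : (cs.drop i).length = cs.length - i := by simp
        have hsp : pvSplit (cs.drop i) [] =
            (cs.drop i).take (PySem.Chars.find (cs.drop i) ['\n','\n']).toNat ::
              pvSplit ((cs.drop i).drop ((PySem.Chars.find (cs.drop i) ['\n','\n']).toNat + 2)) [] := by
          rw [pv_split_find]; simp [hf]
        have hrest : pvSplit ((cs.drop i).drop ((PySem.Chars.find (cs.drop i) ['\n','\n']).toNat + 2)) [] ≠ [] :=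
          pv_split_ne_nil _ _
        have hne1 : ¬ ((i : Int) + PySem.Chars.find (cs.drop i) ['\n','\n'] = -1) := by omega
        have htake : ((cs.drop i).take (PySem.Chars.find (cs.drop i) ['\n','\n']).toNat).length
            = (PySem.Chars.find (cs.drop i) ['\n','\n']).toNat := by
          simp [List.length_take]
          omega
        have hdd : (cs.drop i).drop ((PySem.Chars.find (cs.drop i) ['\n','\n']).toNat + 2)
            = cs.drop (i + ((PySem.Chars.find (cs.drop i) ['\n','\n']).toNat + 2)) := by
          rw [List.drop_drop]
        have htn : ((i : Int) + PySem.Chars.find (cs.drop i) ['\n','\n']).toNat + 2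
            = i + ((PySem.Chars.find (cs.drop i) ['\n','\n']).toNat + 2) := by omega
        have hrec := ih cs (i + ((PySem.Chars.find (cs.drop i) ['\n','\n']).toNat + 2))
          (by omega) (by omega)
        have harith : i + ((PySem.Chars.find (cs.drop i) ['\n','\n']).toNat + 2)
            = i + (PySem.Chars.find (cs.drop i) ['\n','\n']).toNat + 2 := by omega
        have hcastE : (i : Int) + PySem.Chars.find (cs.drop i) ['\n','\n']
            = ((i + (PySem.Chars.find (cs.drop i) ['\n','\n']).toNat : Nat) : Int) := by
          push_cast; omega
        rw [harith] at hrec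
        have hne2 : ¬ (((i + (PySem.Chars.find (cs.drop i) ['\n','\n']).toNat : Nat) : Int) = -1) := by
          omega
        rw [hsp, pv_trim_cons _ _ hrest, pvR]
        simp only [hf, htake, hdd, harith, hcastE, if_false, if_neg hne2, Int.toNat_natCast]
        rw [hrec]
    · have hIl : i = cs.length := by omega
      rw [pvLoopA]
      simp [hIl, pvSplit, pvR]

-- ===== VERDICT (by name: the statement is the Claim_ definition above) =====
theorem get_clean_paragraph_indices_spec : Claim_equal_get_clean_paragraph_indices := by
  intro item _ hpre
  unfold Spec_get_clean_paragraph_indices get_clean_paragraph_indices get_clean_paragraph_indices_alt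
  unfold Pre_get_clean_paragraph_indices at hpre
  cases hlk : item.lookup "document" with
  | none => simp [hlk] at hpre
  | some text =>
    simp only [pv_splitOn_eq, pv_fold_eq]
    have := pv_main text.toList.length text.toList 0 (by omega) (by omega)
    simpa using this
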